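-- pv_equiv track=rewrite | github.com/vieirask/gec_wer | scripts/leven_per_src.py | init_array
-- ===== SOURCE A (Python) =====
-- def init_array(str1, str2):
--     distance = []
--     for i in range(len(str1) + 1):
--         distance.append([0] * (len(str2) + 1))
--         distance[i][0] = i
--     for j in range(len(str2) + 1):
--         distance[0][j] = j
--     return distance
-- ===== SOURCE B (Python) =====
-- def init_array(str1, str2):
--     # Build the TRANSPOSE of the table one COLUMN at a time (column 0 is
--     # 0..len(str1), column j is j followed by zeros), then flip it with zip.
--     m = len(str1)
--     cols = [list(range(m + 1))] + [[j] + [0] * m for j in range(1, len(str2) + 1)]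
--     return [list(row) for row in zip(*cols)]
-- ===== Notes on version B (the rewrite author's own statement) =====
-- stated objective: alternative
-- what changed: B builds the matrix column-wise (a list of columns: 0..m, then j followed by zeros) and transposes it with zip(*cols), instead of A's row-wise allocate-zero-rows-then-patch-both-boundaries overwrite passes.
import Mathlib
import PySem

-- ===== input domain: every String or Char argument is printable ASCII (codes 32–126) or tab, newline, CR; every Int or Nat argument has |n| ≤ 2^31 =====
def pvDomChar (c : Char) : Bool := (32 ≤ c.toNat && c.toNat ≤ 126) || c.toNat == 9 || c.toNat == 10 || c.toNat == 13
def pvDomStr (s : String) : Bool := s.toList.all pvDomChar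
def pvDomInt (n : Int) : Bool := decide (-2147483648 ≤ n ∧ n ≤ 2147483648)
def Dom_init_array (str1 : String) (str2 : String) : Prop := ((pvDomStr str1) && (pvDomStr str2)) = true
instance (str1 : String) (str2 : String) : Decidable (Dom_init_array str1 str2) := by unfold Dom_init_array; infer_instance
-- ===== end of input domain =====

-- B builds the matrix column-wise (column 0 = 0..m, column j = j followed by zeros) and
-- transposes it with zip(*cols), instead of A's allocate-zero-rows-then-patch-boundaries
-- overwrite passes; objective: alternative algorithm of the same cost.


-- ===== PORT A =====
def init_array (str1 : String) (str2 : String) : List (List Int) :=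
  let d1 : List (List Int) :=
    (PySem.List.pyRange 0 (PySem.Str.len str1 + 1) 1).foldl
      (fun distance i =>
        let distance := distance ++ [PySem.List.pyRepeat [(0 : Int)] (PySem.Str.len str2 + 1)]
        PySem.List.pySetD distance i (PySem.List.pySetD (PySem.List.pyGetD distance i []) 0 i)) []
  (PySem.List.pyRange 0 (PySem.Str.len str2 + 1) 1).foldl
    (fun distance j =>
      PySem.List.pySetD distance 0 (PySem.List.pySetD (PySem.List.pyGetD distance 0 []) j j)) d1

-- ===== PORT B =====
-- hand-port of Python's zip(*cols) over lists (exact: rows are the common prefix,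
-- stopping as soon as any column is exhausted; zip of no iterables is empty)
def pvZipStar (cols : List (List Int)) : List (List Int) :=
  match cols with
  | [] => []
  | c :: cs =>
    if h : ((c :: cs).all (fun l => !l.isEmpty)) then
      ((c :: cs).map (fun l => l.headD 0)) :: pvZipStar ((c :: cs).map List.tail)
    else []
  termination_by (cols.headD []).length
  decreasing_by
    simp only [List.all_cons, Bool.and_eq_true] at h
    simp only [List.map_cons, List.headD_cons]
    cases c with
    | nil => simp at h
    | cons a t => simp

def init_array_alt (str1 : String) (str2 : String) : List (List Int) :=
  let m := PySem.Str.len str1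
  let cols := [PySem.List.pyRange 0 (m + 1) 1] ++
    (PySem.List.pyRange 1 (PySem.Str.len str2 + 1) 1).map
      (fun j => [j] ++ PySem.List.pyRepeat [(0 : Int)] m)
  pvZipStar cols

-- ===== PRECONDITION & SPEC =====
def Spec_init_array (str1 : String) (str2 : String) (out : List (List Int)) : Prop := out = init_array_alt str1 str2
instance (str1 : String) (str2 : String) (out : List (List Int)) : Decidable (Spec_init_array str1 str2 out) := by unfold Spec_init_array; infer_instance

-- ===== CLAIM (what is proved, stated in full; the proofs are below) =====
def Claim_equal_init_array : Prop := ∀ (str1 : String) (str2 : String), Dom_init_array str1 str2 → Spec_init_array str1 str2 (init_array str1 str2)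

-- ===== LEMMAS AND PROOFS =====

-- phase 1 of A: appending a zero row and patching its head builds the rows i :: 0^n directly
theorem pv_phase1 (N : Nat) : ∀ (M : Nat),
    (PySem.List.pyRange 0 (M : Int) 1).foldl
      (fun distance i =>
        let distance := distance ++ [PySem.List.pyRepeat [(0 : Int)] ((N : Int) + 1)]
        PySem.List.pySetD distance i (PySem.List.pySetD (PySem.List.pyGetD distance i []) 0 i)) []
    = (PySem.List.pyRange 0 (M : Int) 1).map (fun i => i :: List.replicate N (0 : Int)) := by
  intro M
  induction M with
  | zero => simp
  | succ M ih =>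
    have hM : ((M + 1 : Nat) : Int) = (M : Int) + 1 := by push_cast; ring
    rw [hM, PySem.List.pyRange_one_succ_right (by positivity : (0:Int) ≤ (M : Int)),
        List.foldl_append, List.map_append, ih]
    simp only [List.foldl_cons, List.foldl_nil, List.map_cons, List.map_nil]
    have hrep : PySem.List.pyRepeat [(0 : Int)] ((N : Int) + 1) = List.replicate (N + 1) (0 : Int) := by
      rw [PySem.List.pyRepeat_singleton]; norm_num
    have hlen : ((PySem.List.pyRange 0 (M : Int) 1).map
        (fun i => i :: List.replicate N (0 : Int))).length = M := by
      simp [PySem.List.length_pyRange_one]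
    set prev := (PySem.List.pyRange 0 (M : Int) 1).map (fun i => i :: List.replicate N (0 : Int)) with hprev
    have hget : PySem.List.pyGetD (prev ++ [List.replicate (N + 1) (0 : Int)]) (M : Int) []
        = List.replicate (N + 1) (0 : Int) := by
      rw [PySem.List.pyGetD_natCast]
      simp [List.getD, hlen]
    simp only [hrep, hget]
    have hset1 : PySem.List.pySetD (List.replicate (N + 1) (0 : Int)) 0 (M : Int)
        = (M : Int) :: List.replicate N (0 : Int) := by
      rw [List.replicate_succ]
      rw [show (0 : Int) = ((0 : Nat) : Int) by norm_num, PySem.List.pySetD_natCast]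
      simp
    rw [hset1, PySem.List.pySetD_natCast]
    rw [List.set_append_right _ _ (by omega)]
    simp [hlen]

-- phase 2 of A only rewrites the head row; the tail is untouched
theorem pv_phase2_cons (L : List Int) : ∀ (r : List Int) (rest : List (List Int)),
    L.foldl (fun distance j =>
        PySem.List.pySetD distance 0 (PySem.List.pySetD (PySem.List.pyGetD distance 0 []) j j)) (r :: rest)
    = (L.foldl (fun r j => PySem.List.pySetD r j j) r) :: rest := by
  induction L with
  | nil => intro r rest; simp
  | cons j L ih =>
    intro r rest
    simp only [List.foldl_cons]
    rw [show PySem.List.pyGetD (r :: rest) 0 [] = r by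
          rw [show (0 : Int) = ((0 : Nat) : Int) by norm_num, PySem.List.pyGetD_natCast]; simp [List.getD],
        show ∀ x : List Int, PySem.List.pySetD (r :: rest) 0 x = x :: rest by
          intro x
          rw [show (0 : Int) = ((0 : Nat) : Int) by norm_num, PySem.List.pySetD_natCast]
          simp,
        ih]

-- writing j into cell j for j = 0..K-1 turns the first K cells into the range 0..K-1
theorem pv_phase2_row (r : List Int) : ∀ (K : Nat), K ≤ r.length →
    (PySem.List.pyRange 0 (K : Int) 1).foldl (fun r j => PySem.List.pySetD r j j) r
    = PySem.List.pyRange 0 (K : Int) 1 ++ r.drop K := by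
  intro K
  induction K with
  | zero => simp
  | succ K ih =>
    intro hK
    have hK' : K ≤ r.length := Nat.le_of_succ_le hK
    have hM : ((K + 1 : Nat) : Int) = (K : Int) + 1 := by push_cast; ring
    rw [hM, PySem.List.pyRange_one_succ_right (by positivity : (0:Int) ≤ (K : Int)),
        List.foldl_append, ih hK']
    simp only [List.foldl_cons, List.foldl_nil]
    rw [PySem.List.pySetD_natCast]
    have hlen : (PySem.List.pyRange 0 (K : Int) 1).length = K := by
      simp [PySem.List.length_pyRange_one]
    rw [List.set_append_right _ _ (by omega)]
    have hdrop : r.drop K = r[K] :: r.drop (K + 1) := List.drop_eq_getElem_cons hK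
    rw [hdrop]
    simp [hlen, List.append_assoc]
    rw [hdrop, List.set_cons_zero]

-- transposing "c beside all-zero columns" yields the rows i :: 0^(number of zero columns)
theorem pv_zip_zeros : ∀ (c : List Int) (js : List Int),
    pvZipStar (c :: js.map (fun _ => List.replicate c.length (0 : Int)))
    = c.map (fun i => i :: List.replicate js.length (0 : Int)) := by
  intro c
  induction c with
  | nil =>
    intro js
    rw [pvZipStar]
    simp
  | cons a t ih =>
    intro js
    rw [pvZipStar]
    rw [dif_pos (by simp)]
    have h1 : ((a :: t) :: js.map (fun _ => List.replicate (a :: t).length (0 : Int))).map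
        (fun l => l.headD 0) = a :: js.map (fun _ => (0 : Int)) := by
      simp [List.replicate_succ]
    have h2 : ((a :: t) :: js.map (fun _ => List.replicate (a :: t).length (0 : Int))).map
        List.tail = t :: js.map (fun _ => List.replicate t.length (0 : Int)) := by
      simp [List.replicate_succ]
    rw [h1, h2, ih js]
    simp [List.map_const']

-- the key transpose computation: first column a :: c, later columns j :: 0^|c|
theorem pv_zip_main (a : Int) (c : List Int) (js : List Int) :
    pvZipStar ((a :: c) :: js.map (fun j => j :: List.replicate c.length (0 : Int)))
    = (a :: js) :: c.map (fun i => i :: List.replicate js.length (0 : Int)) := by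
  rw [pvZipStar]
  rw [dif_pos (by simp)]
  have h1 : ((a :: c) :: js.map (fun j => j :: List.replicate c.length (0 : Int))).map
      (fun l => l.headD 0) = a :: js := by
    simp [Function.comp_def]
  have h2 : ((a :: c) :: js.map (fun j => j :: List.replicate c.length (0 : Int))).map
      List.tail = c :: js.map (fun _ => List.replicate c.length (0 : Int)) := by
    simp [Function.comp_def]
  rw [h1, h2, pv_zip_zeros c js]

-- pv_zip_main with the zero-run length given abstractly (for rewriting under casts)
theorem pv_zip_main' (a : Int) (c : List Int) (js : List Int) (m : Nat) (hm : c.length = m) :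
    pvZipStar ((a :: c) :: js.map (fun j => j :: List.replicate m (0 : Int)))
    = (a :: js) :: c.map (fun i => i :: List.replicate js.length (0 : Int)) := by
  subst hm
  exact pv_zip_main a c js

-- ===== VERDICT (by name: the statement is the Claim_ definition above) =====
theorem init_array_spec : Claim_equal_init_array := by
  intro str1 str2 _
  unfold Spec_init_array init_array init_array_alt
  simp only [PySem.Str.len_eq]
  set M := str1.toList.length with hM
  set N := str2.toList.length with hN
  -- A side
  have h1 : ((M : Int) + 1) = ((M + 1 : Nat) : Int) := by push_cast; ring
  have h2 : ((N : Int) + 1) = ((N + 1 : Nat) : Int) := by push_cast; ring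
  rw [h1, pv_phase1 N (M + 1), ← h1]
  rw [PySem.List.pyRange_one_cons (by positivity : (0 : Int) < (M : Int) + 1)]
  simp only [List.map_cons, zero_add]
  rw [pv_phase2_cons, h2,
      pv_phase2_row ((0 : Int) :: List.replicate N (0 : Int)) (N + 1) (by simp)]
  -- B side
  have hrep : PySem.List.pyRepeat [(0 : Int)] (M : Int) = List.replicate M (0 : Int) := by
    rw [PySem.List.pyRepeat_singleton]; norm_num
  have hclen : (PySem.List.pyRange 1 ((M : Int) + 1) 1).length = M := by
    simp [PySem.List.length_pyRange_one]
  have hjlen : (PySem.List.pyRange 1 (((N + 1 : Nat) : Int)) 1).length = N := by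
    simp [PySem.List.length_pyRange_one]
  simp only [List.cons_append, List.nil_append, hrep]
  rw [pv_zip_main' 0 (PySem.List.pyRange 1 ((M : Int) + 1) 1) _ M hclen]
  rw [hjlen]
  congr 1
  rw [show PySem.List.pyRange 0 (((N + 1 : Nat) : Int)) 1
        = (0 : Int) :: PySem.List.pyRange 1 (((N + 1 : Nat) : Int)) 1 by
      rw [PySem.List.pyRange_one_cons (by positivity : (0 : Int) < ((N + 1 : Nat) : Int))]; norm_num]
  simp
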